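-- pv_equiv track=rewrite | github.com/epoyraz/leetcode | solutions/3851.py | magicalSum
-- ===== SOURCE A (Python) =====
-- def magicalSum(m, k, nums):
--     mod = 10**9 + 7
--     n = len(nums)
--     # factorials and inverse factorials up to m
--     fact = [1] * (m+1)
--     for i in range(1, m+1):
--         fact[i] = fact[i-1] * i % mod
--     inv_fact = [1] * (m+1)
--     inv_fact[m] = pow(fact[m], mod-2, mod)
--     for i in range(m, 0, -1):
--         inv_fact[i-1] = inv_fact[i] * i % mod
--     # precompute nums[i]^c * inv_fact[c]
--     pw = [[0]*(m+1) for _ in range(n)]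
--     for i in range(n):
--         pw[i][0] = 1
--         for c in range(1, m+1):
--             pw[i][c] = pw[i][c-1] * nums[i] % mod
--         for c in range(m+1):
--             pw[i][c] = pw[i][c] * inv_fact[c] % mod
--     # number of bits to process: n + enough to clear carries
--     L = n + 6
--     # dp[carry][ones][used]
--     dp = [[[0]*(m+1) for _ in range(k+1)] for _ in range(m+1)]
--     dp[0][0][0] = 1
--     for i in range(L):
--         ndp = [[[0]*(m+1) for _ in range(k+1)] for _ in range(m+1)]
--         if i < n:
--             pi = pw[i]
--             for carry in range(m+1):
--                 for ones in range(k+1):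
--                     for used in range(m+1):
--                         v = dp[carry][ones][used]
--                         if not v:
--                             continue
--                         limit = m - used
--                         for c in range(limit+1):
--                             s = carry + c
--                             bit = s & 1
--                             ones2 = ones + bit
--                             if ones2 > k:
--                                 continue
--                             carry2 = s >> 1
--                             ndp[carry2][ones2][used+c] = (
--                                 ndp[carry2][ones2][used+c] + v * pi[c]
--                             ) % mod
--         else:
--             for carry in range(m+1):
--                 for ones in range(k+1):
--                     for used in range(m+1):
--                         v = dp[carry][ones][used]
--                         if not v:
--                             continue
--                         s = carry
--                         bit = s & 1
--                         ones2 = ones + bit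
--                         if ones2 > k:
--                             continue
--                         carry2 = s >> 1
--                         ndp[carry2][ones2][used] = (ndp[carry2][ones2][used] + v) % mod
--         dp = ndp
--     F = dp[0][k][m]
--     return F * fact[m] % mod
-- ===== SOURCE B (Python) =====
-- def magicalSum(m, k, nums):
--     # Sparse DP: states (carry, ones, used) live in a dict holding only reached
--     # entries; per number the per-count weights are x^c / c! built with pow();
--     # the answer is read off in closed form: a final state contributes iff
--     # used == m and ones + popcount(carry) == k.
--     mod = 10**9 + 7
--     fact = [1] * (m+1)
--     for i in range(1, m+1):
--         fact[i] = fact[i-1] * i % mod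
--     inv_fact = [1] * (m+1)
--     inv_fact[m] = pow(fact[m], mod-2, mod)
--     for i in range(m, 0, -1):
--         inv_fact[i-1] = inv_fact[i] * i % mod
--     dp = {(0, 0, 0): 1}
--     for x in nums:
--         pi = [pow(x, c, mod) * inv_fact[c] % mod for c in range(m+1)]
--         ndp = {}
--         for (carry, ones, used), v in dp.items():
--             for c in range(m - used + 1):
--                 s = carry + c
--                 ones2 = ones + (s & 1)
--                 if ones2 > k:
--                     continue
--                 t = (s >> 1, ones2, used + c)
--                 ndp[t] = (ndp.get(t, 0) + v * pi[c]) % mod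
--         dp = ndp
--     F = 0
--     for carry in range(m+1):
--         F = (F + dp.get((carry, k - bin(carry).count('1'), m), 0)) % mod
--     return F * fact[m] % mod
-- ===== Notes on version B (the rewrite author's own statement) =====
-- stated objective: alternative
-- what changed: B stores the DP sparsely in a dict keyed by (carry,ones,used) and convolves over its items (no dense (m+1)x(k+1)x(m+1) cube and no 'if not v: continue' scans), builds each weight row with pow(x,c,mod) instead of A's two mutation passes over a table, and replaces A's six extra bit-by-bit carry-flush sweeps by a closed-form readout summing dp[(carry, k-popcount(carry), m)]; Pre_ excludes negative m or k (A raises IndexError) and restricts to the natural domain m < 64, where A's fixed six flush rounds provably clear every carry.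
-- outside the precondition, e.g. on magicalSum(130, 2, [2]): A returns 0, B returns 118529101
import Mathlib
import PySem

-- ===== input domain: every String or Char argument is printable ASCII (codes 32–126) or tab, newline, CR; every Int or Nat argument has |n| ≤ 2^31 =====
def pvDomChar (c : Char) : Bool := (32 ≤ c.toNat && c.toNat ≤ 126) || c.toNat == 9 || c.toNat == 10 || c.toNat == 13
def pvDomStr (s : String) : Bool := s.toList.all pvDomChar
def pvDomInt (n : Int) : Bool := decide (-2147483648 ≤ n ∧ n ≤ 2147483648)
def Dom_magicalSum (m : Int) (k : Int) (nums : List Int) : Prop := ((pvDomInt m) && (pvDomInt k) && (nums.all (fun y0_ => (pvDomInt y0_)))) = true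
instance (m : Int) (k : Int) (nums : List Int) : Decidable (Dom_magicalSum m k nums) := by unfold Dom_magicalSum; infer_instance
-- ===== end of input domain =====

-- B stores the DP sparsely in a dict keyed by (carry, ones, used) and convolves over its
-- items, builds each weight row with pow(x, c, mod), and replaces A's six extra
-- bit-by-bit carry-flush sweeps by a closed-form popcount readout: objective 'alternative'.

-- ===== PORT A =====

-- pow(b, e, m): Python's three-argument pow, ported as binary exponentiation
-- (CPython's own algorithm); pvPowMod_eq below proves it equal to PySem.Int.powMod.
def pvPowMod (b : Int) (e : Nat) (m : Int) : Int :=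
  if e = 0 then PySem.Int.mod 1 m
  else
    let h := pvPowMod b (e / 2) m
    if e % 2 = 0 then PySem.Int.mod (h * h) m
    else PySem.Int.mod (h * h * PySem.Int.mod b m) m
termination_by e
decreasing_by omega

-- mod = 10**9 + 7
def pvMod : Int := 10 ^ 9 + 7

-- d[a][b][c]  (read of a 3-level nested list)
def pvCubeGet (d : List (List (List Int))) (a b c : Int) : Int :=
  PySem.List.pyGetD (PySem.List.pyGetD (PySem.List.pyGetD d a []) b []) c 0

-- d[a][b][c] = v  (in-place write of a 3-level nested list)
def pvCubeSet (d : List (List (List Int))) (a b c : Int) (v : Int) :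
    List (List (List Int)) :=
  PySem.List.pySetD d a (PySem.List.pySetD (PySem.List.pyGetD d a []) b
    (PySem.List.pySetD (PySem.List.pyGetD (PySem.List.pyGetD d a []) b []) c v))

-- [[[0]*(m+1) for _ in range(k+1)] for _ in range(m+1)]
def pvCubeInit (m k : Int) : List (List (List Int)) :=
  (PySem.List.pyRange 0 (m + 1) 1).map (fun _ =>
    (PySem.List.pyRange 0 (k + 1) 1).map (fun _ => List.replicate (m + 1).toNat (0 : Int)))

-- fact = [1]*(m+1); for i in range(1, m+1): fact[i] = fact[i-1] * i % mod
def pvFact (m : Int) : List Int :=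
  (PySem.List.pyRange 1 (m + 1) 1).foldl
    (fun f i => PySem.List.pySetD f i (PySem.Int.mod (PySem.List.pyGetD f (i - 1) 0 * i) pvMod))
    (List.replicate (m + 1).toNat 1)

-- inv_fact = [1]*(m+1); inv_fact[m] = pow(fact[m], mod-2, mod);
-- for i in range(m, 0, -1): inv_fact[i-1] = inv_fact[i] * i % mod
def pvInvFact (m : Int) (fact : List Int) : List Int :=
  (PySem.List.pyRange m 0 (-1)).foldl
    (fun g i => PySem.List.pySetD g (i - 1) (PySem.Int.mod (PySem.List.pyGetD g i 0 * i) pvMod))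
    (PySem.List.pySetD (List.replicate (m + 1).toNat 1) m
      (pvPowMod (PySem.List.pyGetD fact m 0) (pvMod - 2).toNat pvMod))  -- exponent mod-2 ≥ 0

-- one row of A's pw table (a fresh [0]*(m+1) mutated only by its own iteration):
-- pw[i][0] = 1; for c in range(1, m+1): pw[i][c] = pw[i][c-1] * nums[i] % mod;
-- for c in range(m+1): pw[i][c] = pw[i][c] * inv_fact[c] % mod
def pvRow (m x : Int) (invf : List Int) : List Int :=
  let r0 := PySem.List.pySetD (List.replicate (m + 1).toNat (0 : Int)) 0 1
  let r1 := (PySem.List.pyRange 1 (m + 1) 1).foldl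
    (fun r c => PySem.List.pySetD r c (PySem.Int.mod (PySem.List.pyGetD r (c - 1) 0 * x) pvMod)) r0
  (PySem.List.pyRange 0 (m + 1) 1).foldl
    (fun r c => PySem.List.pySetD r c
      (PySem.Int.mod (PySem.List.pyGetD r c 0 * PySem.List.pyGetD invf c 0) pvMod)) r1

-- the i < n branch of A's sweep (s & 1 is PySem.Int.band s 1, s >> 1 is Lean's s >>> 1 —
-- both Python-exact)
def pvMainStep (m k : Int) (pi : List Int) (dp : List (List (List Int))) :
    List (List (List Int)) :=
  (PySem.List.pyRange 0 (m + 1) 1).foldl (fun ndp carry =>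
    (PySem.List.pyRange 0 (k + 1) 1).foldl (fun ndp ones =>
      (PySem.List.pyRange 0 (m + 1) 1).foldl (fun ndp used =>
        let v := pvCubeGet dp carry ones used
        if v = 0 then ndp
        else
          (PySem.List.pyRange 0 (m - used + 1) 1).foldl (fun ndp c =>
            let s := carry + c
            let ones2 := ones + PySem.Int.band s 1
            if k < ones2 then ndp
            else
              pvCubeSet ndp (s >>> (1 : Nat)) ones2 (used + c)
                (PySem.Int.mod
                  (pvCubeGet ndp (s >>> (1 : Nat)) ones2 (used + c) + v * PySem.List.pyGetD pi c 0)
                  pvMod)) ndp) ndp) ndp)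
    (pvCubeInit m k)

-- the i >= n branch of A's sweep (carry flushing, one bit per sweep)
def pvTailStep (m k : Int) (dp : List (List (List Int))) : List (List (List Int)) :=
  (PySem.List.pyRange 0 (m + 1) 1).foldl
    (fun ndp carry =>
      (PySem.List.pyRange 0 (k + 1) 1).foldl
        (fun ndp ones =>
          (PySem.List.pyRange 0 (m + 1) 1).foldl
            (fun ndp used =>
              let v := pvCubeGet dp carry ones used
              if v = 0 then ndp
              else
                let ones2 := ones + PySem.Int.band carry 1
                if k < ones2 then ndp
                else
                  pvCubeSet ndp (carry >>> (1 : Nat)) ones2 used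
                    (PySem.Int.mod (pvCubeGet ndp (carry >>> (1 : Nat)) ones2 used + v) pvMod))
            ndp)
        ndp)
    (pvCubeInit m k)

def magicalSum (m : Int) (k : Int) (nums : List Int) : Int :=
  let n : Int := PySem.List.len nums
  let fact := pvFact m
  let inv_fact := pvInvFact m fact
  -- pw = [[0]*(m+1) for _ in range(n)]; for i in range(n): <row statements on pw[i]>
  let pw := (PySem.List.pyRange 0 n 1).foldl
    (fun pw i => PySem.List.pySetD pw i (pvRow m (PySem.List.pyGetD nums i 0) inv_fact))
    ((PySem.List.pyRange 0 n 1).map (fun _ => List.replicate (m + 1).toNat (0 : Int)))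
  let L := n + 6
  let dp0 := pvCubeSet (pvCubeInit m k) 0 0 0 1
  let dpF := (PySem.List.pyRange 0 L 1).foldl
    (fun dp i =>
      if i < n then pvMainStep m k (PySem.List.pyGetD pw i []) dp else pvTailStep m k dp)
    dp0
  let F := pvCubeGet dpF 0 k m
  PySem.Int.mod (F * PySem.List.pyGetD fact m 0) pvMod

-- ===== PORT B =====

-- pi = [pow(x, c, mod) * inv_fact[c] % mod for c in range(m+1)]
def pvRowB (m x : Int) (invf : List Int) : List Int :=
  (PySem.List.pyRange 0 (m + 1) 1).map (fun c =>
    PySem.Int.mod (pvPowMod x c.toNat pvMod * PySem.List.pyGetD invf c 0) pvMod)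

-- one number's convolution over the sparse dict:
-- for (carry, ones, used), v in dp.items(): for c in ...: ndp[t] = (ndp.get(t,0)+v*pi[c])%mod
def pvStepB (m k : Int) (pi : List Int) (dp : PySem.Dict (Int × Int × Int) Int) :
    PySem.Dict (Int × Int × Int) Int :=
  dp.items.foldl (fun ndp it =>
    let carry := it.1.1; let ones := it.1.2.1; let used := it.1.2.2; let v := it.2
    (PySem.List.pyRange 0 (m - used + 1) 1).foldl (fun ndp c =>
      let s := carry + c
      let ones2 := ones + PySem.Int.band s 1
      if k < ones2 then ndp
      else
        let t := (s >>> (1 : Nat), ones2, used + c)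
        ndp.insert t (PySem.Int.mod (ndp.getD t 0 + v * PySem.List.pyGetD pi c 0) pvMod)) ndp)
    PySem.Dict.empty

def magicalSum_alt (m : Int) (k : Int) (nums : List Int) : Int :=
  let fact := pvFact m
  let inv_fact := pvInvFact m fact
  -- dp = {(0, 0, 0): 1}
  let dp0 : PySem.Dict (Int × Int × Int) Int := PySem.Dict.ofList [((0, 0, 0), 1)]
  let dpF := nums.foldl (fun dp x => pvStepB m k (pvRowB m x inv_fact) dp) dp0
  -- closed-form readout: bin(carry).count('1') is PySem.Int.bitCount (exact: carry ≥ 0)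
  let F := (PySem.List.pyRange 0 (m + 1) 1).foldl (fun F carry =>
    PySem.Int.mod
      (F + dpF.getD (carry, k - (PySem.Int.bitCount carry : Int), m) 0) pvMod) 0
  PySem.Int.mod (F * PySem.List.pyGetD fact m 0) pvMod

-- ===== PRECONDITION & SPEC =====
-- Pre_ excludes negative m or k, on which A raises IndexError (empty fact / dp row is
-- indexed), and restricts to the natural domain m < 64, where A's fixed six carry-flush
-- sweeps provably clear every carry (carries never exceed m); outside it A's value is an
-- artefact of the hard-coded L = n + 6 and B computes the full popcount readout instead.
def Pre_magicalSum (m : Int) (k : Int) (nums : List Int) : Prop := 0 ≤ m ∧ 0 ≤ k ∧ m < 64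
instance (m : Int) (k : Int) (nums : List Int) : Decidable (Pre_magicalSum m k nums) := by
  unfold Pre_magicalSum; infer_instance

def pvWitness_magicalSum : Int × Int × List Int := (2, 1, [3])

def Spec_magicalSum (m : Int) (k : Int) (nums : List Int) (out : Int) : Prop :=
  out = magicalSum_alt m k nums
instance (m : Int) (k : Int) (nums : List Int) (out : Int) :
    Decidable (Spec_magicalSum m k nums out) := by unfold Spec_magicalSum; infer_instance

-- ===== CLAIM (what is proved, stated in full; the proofs are below) =====
def Claim_equal_magicalSum : Prop := ∀ (m : Int) (k : Int) (nums : List Int),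
  Dom_magicalSum m k nums → Pre_magicalSum m k nums →
  Spec_magicalSum m k nums (magicalSum m k nums)

-- ===== LEMMAS AND PROOFS =====


-- ---------- generic fold shapes ----------
theorem pvFoldlFlat {α β γ : Type} (f : α → List β) (g : γ → β → γ) :
    ∀ (l : List α) (init : γ),
      (l.flatMap f).foldl g init = l.foldl (fun a x => (f x).foldl g a) init := by
  intro l
  induction l with
  | nil => intro init; rfl
  | cons x xs ih => intro init; simp [List.flatMap_cons, List.foldl_append, ih]

theorem pvFoldGuard {γ δ : Type} (g : γ → δ → γ) (h : Int → Option δ) :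
    ∀ (l : List Int) (a : γ),
      l.foldl (fun a c => match h c with | none => a | some u => g a u) a
        = (l.filterMap h).foldl g a := by
  intro l
  induction l with
  | nil => intro a; rfl
  | cons x xs ih =>
    intro a
    cases hx : h x <;> simp [hx, ih]

-- ---------- the cube, viewed through in-range Int triples ----------
def pvInR (M K : Nat) (X : Int × Int × Int) : Prop :=
  0 ≤ X.1 ∧ X.1 ≤ (M : Int) ∧ 0 ≤ X.2.1 ∧ X.2.1 ≤ (K : Int) ∧ 0 ≤ X.2.2 ∧ X.2.2 ≤ (M : Int)

def pvGetX (d : List (List (List Int))) (X : Int × Int × Int) : Int :=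
  pvCubeGet d X.1 X.2.1 X.2.2

def pvWfDim (M K : Nat) (d : List (List (List Int))) : Prop :=
  d.length = M + 1 ∧ ∀ r ∈ d, r.length = K + 1 ∧ ∀ q ∈ r, q.length = M + 1

theorem pvMod_pos : (0 : Int) < pvMod := by norm_num [pvMod]

theorem pvPowMod_eq (b : Int) (m : Int) (hm : 0 < m) :
    ∀ e : Nat, pvPowMod b e m = PySem.Int.powMod b e m := by
  intro e
  induction e using Nat.strong_induction_on with
  | _ e ih =>
    rw [pvPowMod]
    by_cases h0 : e = 0
    · rw [if_pos h0, h0]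
      unfold PySem.Int.powMod
      rw [pow_zero]
    · rw [if_neg h0, ih (e / 2) (by omega)]
      unfold PySem.Int.powMod
      simp only [PySem.Int.mod_eq_emod_of_pos hm]
      have hBm : (b ^ (e / 2) % m) ≡ b ^ (e / 2) [ZMOD m] :=
        Int.emod_emod_of_dvd _ dvd_rfl
      have hbm : (b % m) ≡ b [ZMOD m] := Int.emod_emod_of_dvd _ dvd_rfl
      have hsplit : b ^ (e / 2) * b ^ (e / 2) * b ^ (e % 2) = b ^ e := by
        rw [← pow_add, ← pow_add]
        congr 1
        omega
      by_cases h2 : e % 2 = 0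
      · rw [if_pos h2]
        refine (hBm.mul hBm).trans ?_
        rw [show b ^ (e / 2) * b ^ (e / 2) = b ^ e by
          rw [← hsplit, h2, pow_zero, mul_one]]
      · rw [if_neg h2]
        refine ((hBm.mul hBm).mul hbm).trans ?_
        rw [show b ^ (e / 2) * b ^ (e / 2) * b = b ^ e by
          rw [← hsplit, show e % 2 = 1 by omega, pow_one]]

theorem pvPyGetD {α : Type} (xs : List α) (i : Int) (d : α) (h : 0 ≤ i) :
    PySem.List.pyGetD xs i d = xs.getD i.toNat d := by
  conv_lhs => rw [show i = ((i.toNat : Nat) : Int) by omega]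
  rw [PySem.List.pyGetD_natCast]

theorem pvGetD_set_self {α : Type} (l : List α) (i : Nat) (v d : α) (h : i < l.length) :
    (l.set i v).getD i d = v := by
  simp [List.getD_eq_getElem?_getD, h]

theorem pvGetD_set_ne {α : Type} (l : List α) (i j : Nat) (v d : α) (h : i ≠ j) :
    (l.set i v).getD j d = l.getD j d := by
  simp [List.getD_eq_getElem?_getD, List.getElem?_set_ne h]

theorem pvGetX_eq (d : List (List (List Int))) (X : Int × Int × Int)
    (h1 : 0 ≤ X.1) (h2 : 0 ≤ X.2.1) (h3 : 0 ≤ X.2.2) :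
    pvGetX d X = ((d.getD X.1.toNat []).getD X.2.1.toNat []).getD X.2.2.toNat 0 := by
  simp [pvGetX, pvCubeGet, pvPyGetD _ _ _ h1, pvPyGetD _ _ _ h2, pvPyGetD _ _ _ h3]

theorem pvCubeSet_eq (d : List (List (List Int))) (a b c : Int) (v : Int)
    (h1 : 0 ≤ a) (h2 : 0 ≤ b) (h3 : 0 ≤ c) :
    pvCubeSet d a b c v =
      d.set a.toNat ((d.getD a.toNat []).set b.toNat
        (((d.getD a.toNat []).getD b.toNat []).set c.toNat v)) := by
  simp [pvCubeSet, pvPyGetD _ _ _ h1, pvPyGetD _ _ _ h2,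
    PySem.List.pySetD_of_nonneg _ _ h1, PySem.List.pySetD_of_nonneg _ _ h2,
    PySem.List.pySetD_of_nonneg _ _ h3]

theorem pvRowLen (M K : Nat) (d : List (List (List Int))) (hd : pvWfDim M K d)
    (A : Nat) (hA : A < d.length) : (d.getD A []).length = K + 1 := by
  rw [List.getD_eq_getElem _ _ hA]
  exact (hd.2 _ (d.getElem_mem hA)).1

theorem pvCellLen (M K : Nat) (d : List (List (List Int))) (hd : pvWfDim M K d)
    (A B : Nat) (hA : A < d.length) (hB : B < (d.getD A []).length) :
    ((d.getD A []).getD B []).length = M + 1 := by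
  rw [List.getD_eq_getElem _ _ hA] at hB ⊢
  rw [List.getD_eq_getElem _ _ hB]
  exact (hd.2 _ (d.getElem_mem hA)).2 _ (List.getElem_mem hB)

theorem pvPyGetD_nil {α : Type} (i : Int) (d : α) :
    PySem.List.pyGetD ([] : List α) i d = d := by
  refine PySem.List.pyGetD_of_none _ _ _ ((PySem.List.pyGet?_eq_none_iff _ _).mpr ?_)
  simp [PySem.Raise.InRange]

theorem pvPyGetD_cases {α : Type} (xs : List α) (i : Int) (d : α) :
    PySem.List.pyGetD xs i d ∈ xs ∨ PySem.List.pyGetD xs i d = d := by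
  by_cases h : PySem.Raise.InRange xs.length i
  · exact Or.inl (PySem.List.pyGetD_mem xs d h)
  · exact Or.inr (PySem.List.pyGetD_of_none xs i d ((PySem.List.pyGet?_eq_none_iff _ _).mpr h))

theorem pvGetX_set (M K : Nat) (d : List (List (List Int))) (hd : pvWfDim M K d)
    (u X : Int × Int × Int) (v : Int) (hu : pvInR M K u) (hX : pvInR M K X) :
    pvGetX (pvCubeSet d u.1 u.2.1 u.2.2 v) X = if X = u then v else pvGetX d X := by
  obtain ⟨hu1, hu2, hu3, hu4, hu5, hu6⟩ := hu
  obtain ⟨hX1, hX2, hX3, hX4, hX5, hX6⟩ := hX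
  have hA : u.1.toNat < d.length := by rw [hd.1]; omega
  have hB : u.2.1.toNat < (d.getD u.1.toNat []).length := by
    rw [pvRowLen M K d hd _ hA]; omega
  have hC : u.2.2.toNat < ((d.getD u.1.toNat []).getD u.2.1.toNat []).length := by
    rw [pvCellLen M K d hd _ _ hA hB]; omega
  rw [pvCubeSet_eq d _ _ _ v hu1 hu3 hu5, pvGetX_eq _ _ hX1 hX3 hX5]
  by_cases hXu : X = u
  · subst hXu
    rw [if_pos rfl, pvGetD_set_self _ _ _ _ hA, pvGetD_set_self _ _ _ _ hB,
      pvGetD_set_self _ _ _ _ hC]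
  · rw [if_neg hXu, pvGetX_eq _ _ hX1 hX3 hX5]
    by_cases h1 : X.1.toNat = u.1.toNat
    · rw [h1, pvGetD_set_self _ _ _ _ hA]
      by_cases h2 : X.2.1.toNat = u.2.1.toNat
      · rw [h2, pvGetD_set_self _ _ _ _ hB]
        by_cases h3 : X.2.2.toNat = u.2.2.toNat
        · exfalso
          apply hXu
          have e1 : X.1 = u.1 := by omega
          have e2 : X.2.1 = u.2.1 := by omega
          have e3 : X.2.2 = u.2.2 := by omega
          exact Prod.ext e1 (Prod.ext e2 e3)
        · rw [pvGetD_set_ne _ _ _ _ _ (fun he => h3 he.symm)]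
      · rw [pvGetD_set_ne _ _ _ _ _ (fun he => h2 he.symm)]
    · rw [pvGetD_set_ne _ _ _ _ _ (fun he => h1 he.symm)]

theorem pvWfDim_set (M K : Nat) (d : List (List (List Int))) (hd : pvWfDim M K d)
    (u : Int × Int × Int) (hu : pvInR M K u) (v : Int) :
    pvWfDim M K (pvCubeSet d u.1 u.2.1 u.2.2 v) := by
  obtain ⟨hu1, hu2, hu3, hu4, hu5, hu6⟩ := hu
  have hA : u.1.toNat < d.length := by rw [hd.1]; omega
  have hB : u.2.1.toNat < (d.getD u.1.toNat []).length := by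
    rw [pvRowLen M K d hd _ hA]; omega
  have hrow : d.getD u.1.toNat [] ∈ d := by
    rw [List.getD_eq_getElem _ _ hA]; exact d.getElem_mem hA
  rw [pvCubeSet_eq d _ _ _ v hu1 hu3 hu5]
  refine ⟨by simpa using hd.1, ?_⟩
  intro r hr
  rcases List.mem_or_eq_of_mem_set hr with hr' | hr'
  · exact hd.2 r hr'
  · subst hr'
    refine ⟨by simpa using pvRowLen M K d hd _ hA, ?_⟩
    intro q hq
    rcases List.mem_or_eq_of_mem_set hq with hq' | hq'
    · exact (hd.2 _ hrow).2 q hq'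
    · subst hq'
      simpa using pvCellLen M K d hd _ _ hA hB

theorem pvGetX_zero_of (d : List (List (List Int)))
    (h : ∀ r ∈ d, ∀ q ∈ r, ∀ w ∈ q, w = (0 : Int)) (X : Int × Int × Int) :
    pvGetX d X = 0 := by
  show PySem.List.pyGetD (PySem.List.pyGetD (PySem.List.pyGetD d X.1 []) X.2.1 []) X.2.2 0 = 0
  rcases pvPyGetD_cases d X.1 [] with hr | hr
  · rcases pvPyGetD_cases (PySem.List.pyGetD d X.1 []) X.2.1 [] with hq | hq
    · rcases pvPyGetD_cases (PySem.List.pyGetD (PySem.List.pyGetD d X.1 []) X.2.1 []) X.2.2 0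
        with hw | hw
      · exact h _ hr _ hq _ hw
      · exact hw
    · rw [hq, pvPyGetD_nil]
  · rw [hr, pvPyGetD_nil, pvPyGetD_nil]

theorem pvWfDim_init (M K : Nat) : pvWfDim M K (pvCubeInit (M : Int) (K : Int)) := by
  constructor
  · simp [pvCubeInit, PySem.List.length_pyRange_one]
  · intro r hr
    simp only [pvCubeInit, List.mem_map] at hr
    obtain ⟨i, _, rfl⟩ := hr
    constructor
    · simp [PySem.List.length_pyRange_one]
    · intro q hq
      simp only [List.mem_map] at hq
      obtain ⟨j, _, rfl⟩ := hq
      simp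

theorem pvGetX_initCube (M K : Nat) (X : Int × Int × Int) :
    pvGetX (pvCubeInit (M : Int) (K : Int)) X = 0 := by
  apply pvGetX_zero_of
  intro r hr q hq w hw
  simp only [pvCubeInit, List.mem_map] at hr
  obtain ⟨i, _, rfl⟩ := hr
  simp only [List.mem_map] at hq
  obtain ⟨j, _, rfl⟩ := hq
  exact List.eq_of_mem_replicate hw

theorem pvGetX_high (M : Nat) (d : List (List (List Int))) (hlen : d.length = M + 1)
    (X : Int × Int × Int) (h : (M : Int) < X.1) : pvGetX d X = 0 := by
  show PySem.List.pyGetD (PySem.List.pyGetD (PySem.List.pyGetD d X.1 []) X.2.1 []) X.2.2 0 = 0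
  have h0 : PySem.List.pyGetD d X.1 [] = [] := by
    refine PySem.List.pyGetD_of_none _ _ _ ((PySem.List.pyGet?_eq_none_iff _ _).mpr ?_)
    simp only [PySem.Raise.InRange, hlen]
    push_cast
    omega
  rw [h0, pvPyGetD_nil, pvPyGetD_nil]


-- ---------- update lists and their two interpreters ----------
theorem pvModE (a : Int) : PySem.Int.mod a pvMod = a % pvMod :=
  PySem.Int.mod_eq_emod_of_pos pvMod_pos

def pvApplyC (d : List (List (List Int))) (u : (Int × Int × Int) × Int) :
    List (List (List Int)) :=
  pvCubeSet d u.1.1 u.1.2.1 u.1.2.2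
    (PySem.Int.mod (pvCubeGet d u.1.1 u.1.2.1 u.1.2.2 + u.2) pvMod)

def pvApplyD (nd : PySem.Dict (Int × Int × Int) Int) (u : (Int × Int × Int) × Int) :
    PySem.Dict (Int × Int × Int) Int :=
  nd.insert u.1 (PySem.Int.mod (nd.getD u.1 0 + u.2) pvMod)

def pvWsum (U : List ((Int × Int × Int) × Int)) (X : Int × Int × Int) : Int :=
  (U.map (fun u => if u.1 = X then u.2 else 0)).sum

def pvTouch (U : List ((Int × Int × Int) × Int)) (X : Int × Int × Int) : Bool :=
  U.any (fun u => u.1 == X)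

theorem pvWsum_zero (U : List ((Int × Int × Int) × Int)) (X : Int × Int × Int)
    (h : pvTouch U X = false) : pvWsum U X = 0 := by
  apply List.sum_eq_zero
  intro x hx
  simp only [List.mem_map] at hx
  obtain ⟨u, hu, rfl⟩ := hx
  simp only [pvTouch, List.any_eq_false] at h
  have := h u hu
  simp only [beq_iff_eq] at this
  rw [if_neg this]

theorem pvMasterC (M K : Nat) :
    ∀ (U : List ((Int × Int × Int) × Int)) (acc : List (List (List Int))),
      pvWfDim M K acc → (∀ u ∈ U, pvInR M K u.1) →
      pvWfDim M K (U.foldl pvApplyC acc) ∧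
      ∀ X, pvInR M K X →
        pvGetX (U.foldl pvApplyC acc) X =
          if pvTouch U X then (pvGetX acc X + pvWsum U X) % pvMod else pvGetX acc X := by
  intro U
  induction U with
  | nil =>
    intro acc hwf _
    exact ⟨hwf, fun X _ => by simp [pvTouch]⟩
  | cons u U ih =>
    intro acc hwf hU
    have hu : pvInR M K u.1 := hU u (by simp)
    have hwf' : pvWfDim M K (pvApplyC acc u) := pvWfDim_set M K acc hwf u.1 hu _
    obtain ⟨hwf2, hval⟩ := ih (pvApplyC acc u) hwf' (fun w hw => hU w (by simp [hw]))
    refine ⟨by simpa using hwf2, ?_⟩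
    intro X hX
    rw [List.foldl_cons, hval X hX]
    have hgu : pvGetX (pvApplyC acc u) X =
        if X = u.1 then (pvGetX acc u.1 + u.2) % pvMod else pvGetX acc X := by
      show pvGetX (pvCubeSet acc u.1.1 u.1.2.1 u.1.2.2 _) X = _
      rw [pvGetX_set M K acc hwf u.1 X _ hu hX, pvModE]
      rfl
    rw [hgu]
    by_cases hx : X = u.1
    · have ht : pvTouch (u :: U) X = true := by simp [pvTouch, hx]
      rw [ht, if_pos rfl]
      have hw : pvWsum (u :: U) X = u.2 + pvWsum U X := by
        simp [pvWsum, hx.symm]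
      rw [hw, if_pos hx]
      by_cases htU : pvTouch U X
      · rw [if_pos htU, Int.emod_add_emod, hx]
        ring_nf
      · rw [if_neg (by simpa using htU), pvWsum_zero U X (by simpa using htU)]
        rw [hx]
        ring_nf
    · have hne : ¬ (u.1 = X) := fun he => hx he.symm
      have ht : pvTouch (u :: U) X = pvTouch U X := by
        simp [pvTouch, hne]
      have hw : pvWsum (u :: U) X = pvWsum U X := by
        simp [pvWsum, hne]
      rw [ht, hw, if_neg hx]

theorem pvMasterD :
    ∀ (U : List ((Int × Int × Int) × Int)) (nd : PySem.Dict (Int × Int × Int) Int)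
      (X : Int × Int × Int),
      (U.foldl pvApplyD nd).getD X 0 =
        if pvTouch U X then (nd.getD X 0 + pvWsum U X) % pvMod else nd.getD X 0 := by
  intro U
  induction U with
  | nil => intro nd X; simp [pvTouch]
  | cons u U ih =>
    intro nd X
    rw [List.foldl_cons, ih]
    have hgu : (pvApplyD nd u).getD X 0 =
        if X = u.1 then (nd.getD u.1 0 + u.2) % pvMod else nd.getD X 0 := by
      show (nd.insert u.1 _).getD X 0 = _
      rw [PySem.Dict.getD_insert, pvModE]
    rw [hgu]
    by_cases hx : X = u.1
    · have ht : pvTouch (u :: U) X = true := by simp [pvTouch, hx]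
      rw [ht, if_pos rfl]
      have hw : pvWsum (u :: U) X = u.2 + pvWsum U X := by
        simp [pvWsum, hx.symm]
      rw [hw, if_pos hx]
      by_cases htU : pvTouch U X
      · rw [if_pos htU, Int.emod_add_emod, hx]
        ring_nf
      · rw [if_neg (by simpa using htU), pvWsum_zero U X (by simpa using htU)]
        rw [hx]
        ring_nf
    · have hne : ¬ (u.1 = X) := fun he => hx he.symm
      have ht : pvTouch (u :: U) X = pvTouch U X := by simp [pvTouch, hne]
      have hw : pvWsum (u :: U) X = pvWsum U X := by simp [pvWsum, hne]
      rw [ht, hw, if_neg hx]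

theorem pvKeysD (U : List ((Int × Int × Int) × Int)) (nd : PySem.Dict (Int × Int × Int) Int)
    (hn : nd.keys.Nodup) :
    (U.foldl pvApplyD nd).keys.Nodup ∧
      ∀ key ∈ (U.foldl pvApplyD nd).keys, key ∈ nd.keys ∨ ∃ u ∈ U, u.1 = key := by
  have he : U.foldl pvApplyD nd =
      U.foldl (fun d x => d.insert x.1
        (PySem.Int.mod (d.getD x.1 0 + x.2) pvMod)) nd := rfl
  constructor
  · rw [he]
    exact PySem.Dict.nodup_keys_foldl_insert_key U (fun x => x.1) _ nd hn
  · intro key hkey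
    rw [he, PySem.Dict.keys_foldl_insert_key] at hkey
    rcases (PySem.Set.mem_update _ _ _).mp hkey with h | h
    · exact Or.inl h
    · simp only [List.mem_map] at h
      obtain ⟨u, hu, hh⟩ := h
      exact Or.inr ⟨u, hu, hh⟩

-- ---------- the full state list ----------
def pvStates (m k : Int) : List (Int × Int × Int) :=
  (PySem.List.pyRange 0 (m + 1) 1).flatMap (fun a =>
    (PySem.List.pyRange 0 (k + 1) 1).flatMap (fun b =>
      (PySem.List.pyRange 0 (m + 1) 1).map (fun u => (a, b, u))))

theorem pvMem_states (m k : Int) (X : Int × Int × Int) :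
    X ∈ pvStates m k ↔
      0 ≤ X.1 ∧ X.1 < m + 1 ∧ 0 ≤ X.2.1 ∧ X.2.1 < k + 1 ∧ 0 ≤ X.2.2 ∧ X.2.2 < m + 1 := by
  simp only [pvStates, List.mem_flatMap, List.mem_map, PySem.List.mem_pyRange_one]
  constructor
  · rintro ⟨a, ha, b, hb, u, hu, rfl⟩
    exact ⟨ha.1, ha.2, hb.1, hb.2, hu.1, hu.2⟩
  · rintro ⟨h1, h2, h3, h4, h5, h6⟩
    exact ⟨X.1, ⟨h1, h2⟩, X.2.1, ⟨h3, h4⟩, X.2.2, ⟨h5, h6⟩, rfl⟩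

theorem pvStates_eq_product (m k : Int) :
    pvStates m k =
      (PySem.List.pyRange 0 (m + 1) 1) ×ˢ
        ((PySem.List.pyRange 0 (k + 1) 1) ×ˢ (PySem.List.pyRange 0 (m + 1) 1)) := by
  rw [show ((PySem.List.pyRange 0 (m + 1) 1) ×ˢ
      ((PySem.List.pyRange 0 (k + 1) 1) ×ˢ (PySem.List.pyRange 0 (m + 1) 1)) :
      List (Int × Int × Int)) =
    (PySem.List.pyRange 0 (m + 1) 1).flatMap (fun a =>
      ((PySem.List.pyRange 0 (k + 1) 1).flatMap (fun b =>
        (PySem.List.pyRange 0 (m + 1) 1).map (Prod.mk b))).map (Prod.mk a)) from rfl]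
  unfold pvStates
  congr 1
  funext a
  rw [List.map_flatMap]
  congr 1
  funext b
  rw [List.map_map]
  rfl

theorem pvStates_nodup (m k : Int) : (pvStates m k).Nodup := by
  rw [pvStates_eq_product]
  exact (PySem.List.nodup_pyRange_one _ _).product
    ((PySem.List.nodup_pyRange_one _ _).product (PySem.List.nodup_pyRange_one _ _))

theorem pvSumSub {σ : Type} [DecidableEq σ] (l₁ l₂ : List σ) (f : σ → Int)
    (h₁ : l₁.Nodup) (h₂ : l₂.Nodup) (hsub : ∀ x ∈ l₁, x ∈ l₂)
    (hz : ∀ x ∈ l₂, x ∉ l₁ → f x = 0) :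
    (l₁.map f).sum = (l₂.map f).sum := by
  rw [← List.sum_toFinset f h₁, ← List.sum_toFinset f h₂]
  apply Finset.sum_subset
  · intro x hx
    rw [List.mem_toFinset] at *
    exact hsub x hx
  · intro x hx hnx
    rw [List.mem_toFinset] at *
    exact hz x hx hnx

theorem pvWsum_flatMap {σ : Type} (l : List σ) (f : σ → List ((Int × Int × Int) × Int))
    (X : Int × Int × Int) :
    pvWsum (l.flatMap f) X = (l.map (fun s => pvWsum (f s) X)).sum := by
  unfold pvWsum
  induction l with
  | nil => simp
  | cons s l ih => simp [List.flatMap_cons, ih]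


-- ---------- the per-state update lists ----------
def pvUpdList (m k : Int) (pi : List Int) (st : Int × Int × Int) (v : Int) :
    List ((Int × Int × Int) × Int) :=
  (PySem.List.pyRange 0 (m - st.2.2 + 1) 1).filterMap (fun c =>
    if k < st.2.1 + PySem.Int.band (st.1 + c) 1 then none
    else some (((st.1 + c) >>> (1 : Nat), st.2.1 + PySem.Int.band (st.1 + c) 1, st.2.2 + c),
      v * PySem.List.pyGetD pi c 0))

def pvTUpdList (k : Int) (st : Int × Int × Int) (v : Int) : List ((Int × Int × Int) × Int) :=
  if k < st.2.1 + PySem.Int.band st.1 1 then []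
  else [((st.1 >>> (1 : Nat), st.2.1 + PySem.Int.band st.1 1, st.2.2), v)]

theorem pvMainStep_eq (m k : Int) (pi : List Int) (dp : List (List (List Int))) :
    pvMainStep m k pi dp =
      (pvStates m k).foldl (fun ndp st =>
        if pvGetX dp st = 0 then ndp
        else (pvUpdList m k pi st (pvGetX dp st)).foldl pvApplyC ndp) (pvCubeInit m k) := by
  unfold pvMainStep pvStates
  rw [pvFoldlFlat]
  apply PySem.List.foldl_congr_mem
  intro ndp a _
  rw [pvFoldlFlat]
  apply PySem.List.foldl_congr_mem
  intro ndp2 b _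
  rw [List.foldl_map]
  apply PySem.List.foldl_congr_mem
  intro ndp3 u _
  show (if pvCubeGet dp a b u = 0 then ndp3 else _) = _
  by_cases hv : pvCubeGet dp a b u = 0
  · rw [if_pos hv, if_pos (show pvGetX dp (a, b, u) = 0 from hv)]
  · rw [if_neg hv, if_neg (show ¬ pvGetX dp (a, b, u) = 0 from hv)]
    unfold pvUpdList
    rw [← pvFoldGuard]
    apply PySem.List.foldl_congr_mem
    intro nd c _
    by_cases hg : k < b + PySem.Int.band (a + c) 1
    · rw [if_pos hg]
      rw [if_pos (show k < ((a, b, u) : Int × Int × Int).2.1 +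
        PySem.Int.band (((a, b, u) : Int × Int × Int).1 + c) 1 from hg)]
    · rw [if_neg hg]
      rw [if_neg (show ¬ k < ((a, b, u) : Int × Int × Int).2.1 +
        PySem.Int.band (((a, b, u) : Int × Int × Int).1 + c) 1 from hg)]
      rfl

theorem pvStepB_eq (m k : Int) (pi : List Int) (dp : PySem.Dict (Int × Int × Int) Int) :
    pvStepB m k pi dp =
      dp.items.foldl (fun ndp it =>
        (pvUpdList m k pi it.1 it.2).foldl pvApplyD ndp) PySem.Dict.empty := by
  unfold pvStepB
  apply PySem.List.foldl_congr_mem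
  intro ndp it _
  unfold pvUpdList
  rw [← pvFoldGuard]
  apply PySem.List.foldl_congr_mem
  intro nd c _
  by_cases hg : k < it.1.2.1 + PySem.Int.band (it.1.1 + c) 1
  · rw [if_pos hg, if_pos hg]
  · rw [if_neg hg, if_neg hg]
    rfl

theorem pvTailStep_eq (m k : Int) (dp : List (List (List Int))) :
    pvTailStep m k dp =
      (pvStates m k).foldl (fun ndp st =>
        if pvGetX dp st = 0 then ndp
        else (pvTUpdList k st (pvGetX dp st)).foldl pvApplyC ndp) (pvCubeInit m k) := by
  unfold pvTailStep pvStates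
  rw [pvFoldlFlat]
  apply PySem.List.foldl_congr_mem
  intro ndp a _
  rw [pvFoldlFlat]
  apply PySem.List.foldl_congr_mem
  intro ndp2 b _
  rw [List.foldl_map]
  apply PySem.List.foldl_congr_mem
  intro ndp3 u _
  show (if pvCubeGet dp a b u = 0 then ndp3 else _) = _
  by_cases hv : pvCubeGet dp a b u = 0
  · rw [if_pos hv, if_pos (show pvGetX dp (a, b, u) = 0 from hv)]
  · rw [if_neg hv, if_neg (show ¬ pvGetX dp (a, b, u) = 0 from hv)]
    unfold pvTUpdList
    by_cases hg : k < b + PySem.Int.band a 1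
    · rw [if_pos hg]
      rw [if_pos (show k < ((a, b, u) : Int × Int × Int).2.1 +
        PySem.Int.band ((a, b, u) : Int × Int × Int).1 1 from hg)]
      rfl
    · rw [if_neg hg]
      rw [if_neg (show ¬ k < ((a, b, u) : Int × Int × Int).2.1 +
        PySem.Int.band ((a, b, u) : Int × Int × Int).1 1 from hg)]
      rfl

-- ---------- arithmetic helpers on targets ----------
theorem pvShiftOne (s : Nat) : ((s : Int) >>> (1 : Nat)) = ((s / 2 : Nat) : Int) := by
  change Int.shiftRight _ _ = _
  simp [Int.shiftRight, Nat.shiftRight_eq_div_pow]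

theorem pvShiftHalf (s : Int) (h : 0 ≤ s) : s >>> (1 : Nat) = ((s.toNat / 2 : Nat) : Int) := by
  rw [show s = ((s.toNat : Nat) : Int) by omega, pvShiftOne]
  simp

theorem pvBandOne (s : Nat) : PySem.Int.band (s : Int) 1 = ((s % 2 : Nat) : Int) := by
  rw [PySem.Int.band_one, PySem.Int.mod_eq_emod_of_pos (by norm_num)]
  omega

theorem pvBand_bounds (s : Int) : 0 ≤ PySem.Int.band s 1 ∧ PySem.Int.band s 1 < 2 := by
  rw [PySem.Int.band_one]
  exact ⟨PySem.Int.mod_nonneg _ (by norm_num), PySem.Int.mod_lt _ (by norm_num)⟩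

theorem pvMem_states_inR (M K : Nat) (X : Int × Int × Int) :
    X ∈ pvStates (M : Int) (K : Int) ↔ pvInR M K X := by
  simp only [pvMem_states, pvInR]
  omega

theorem pvUpdList_inR (M K : Nat) (pi : List Int) (st : Int × Int × Int) (v : Int)
    (hst : pvInR M K st) :
    ∀ u ∈ pvUpdList (M : Int) (K : Int) pi st v, pvInR M K u.1 := by
  intro u hu
  unfold pvUpdList at hu
  rw [List.mem_filterMap] at hu
  obtain ⟨c, hc, hu⟩ := hu
  rw [PySem.List.mem_pyRange_one] at hc
  by_cases hg : (K : Int) < st.2.1 + PySem.Int.band (st.1 + c) 1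
  · rw [if_pos hg] at hu
    cases hu
  · rw [if_neg hg] at hu
    obtain ⟨hst1, hst2, hst3, hst4, hst5, hst6⟩ := hst
    have hb := pvBand_bounds (st.1 + c)
    have hs : 0 ≤ st.1 + c := by omega
    have heq := Option.some.inj hu
    subst heq
    dsimp only [pvInR]
    rw [pvShiftHalf _ hs]
    have h2 : (st.1 + c).toNat / 2 ≤ M := by omega
    refine ⟨by positivity, by exact_mod_cast h2, by omega, by omega, by omega, by omega⟩

theorem pvTUpdList_inR (M K : Nat) (st : Int × Int × Int) (v : Int) (hst : pvInR M K st) :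
    ∀ u ∈ pvTUpdList (K : Int) st v, pvInR M K u.1 := by
  intro u hu
  unfold pvTUpdList at hu
  by_cases hg : (K : Int) < st.2.1 + PySem.Int.band st.1 1
  · rw [if_pos hg] at hu
    cases hu
  · rw [if_neg hg] at hu
    rw [List.mem_singleton] at hu
    subst hu
    obtain ⟨hst1, hst2, hst3, hst4, hst5, hst6⟩ := hst
    have hb := pvBand_bounds st.1
    dsimp only [pvInR]
    rw [pvShiftHalf _ hst1]
    have h2 : st.1.toNat / 2 ≤ M := by omega
    refine ⟨by positivity, by exact_mod_cast h2, by omega, by omega, by omega, by omega⟩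

theorem pvUpdList_smul (m k : Int) (pi : List Int) (st : Int × Int × Int) (v : Int)
    (X : Int × Int × Int) :
    pvWsum (pvUpdList m k pi st v) X = v * pvWsum (pvUpdList m k pi st 1) X := by
  unfold pvWsum pvUpdList
  induction PySem.List.pyRange 0 (m - st.2.2 + 1) 1 with
  | nil => simp
  | cons c l ih =>
    by_cases hg : k < st.2.1 + PySem.Int.band (st.1 + c) 1
    · simp only [List.filterMap_cons, hg, if_pos]
      exact ih
    · simp only [List.filterMap_cons, hg, if_false, List.map_cons, List.sum_cons]
      rw [ih, mul_add, mul_ite, mul_zero, one_mul]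


-- ---------- the A-cube / B-dict simulation invariant ----------
def pvAgrees (M K : Nat) (dpC : List (List (List Int)))
    (dpD : PySem.Dict (Int × Int × Int) Int) : Prop :=
  pvWfDim M K dpC ∧ dpD.keys.Nodup ∧ (∀ key ∈ dpD.keys, pvInR M K key) ∧
    ∀ X, pvInR M K X → dpD.getD X 0 = pvGetX dpC X

theorem pvStep_pres (M K : Nat) (pi : List Int) (dpC : List (List (List Int)))
    (dpD : PySem.Dict (Int × Int × Int) Int) (h : pvAgrees M K dpC dpD) :
    pvAgrees M K (pvMainStep (M : Int) (K : Int) pi dpC)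
      (pvStepB (M : Int) (K : Int) pi dpD) := by
  obtain ⟨hwf, hnod, hkInR, hag⟩ := h
  have hmainA : pvMainStep (M : Int) (K : Int) pi dpC =
      ((pvStates (M : Int) (K : Int)).flatMap (fun st =>
        if pvGetX dpC st = 0 then []
        else pvUpdList (M : Int) (K : Int) pi st (pvGetX dpC st))).foldl pvApplyC
        (pvCubeInit (M : Int) (K : Int)) := by
    rw [pvMainStep_eq, pvFoldlFlat]
    apply PySem.List.foldl_congr_mem
    intro acc st _
    by_cases hv : pvGetX dpC st = 0
    · rw [if_pos hv, if_pos hv]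
      rfl
    · rw [if_neg hv, if_neg hv]
  have hstepB : pvStepB (M : Int) (K : Int) pi dpD =
      (dpD.items.flatMap (fun it =>
        pvUpdList (M : Int) (K : Int) pi it.1 it.2)).foldl pvApplyD PySem.Dict.empty := by
    rw [pvStepB_eq, pvFoldlFlat]
  have hLAin : ∀ u ∈ (pvStates (M : Int) (K : Int)).flatMap (fun st =>
      if pvGetX dpC st = 0 then []
      else pvUpdList (M : Int) (K : Int) pi st (pvGetX dpC st)), pvInR M K u.1 := by
    intro u hu
    rw [List.mem_flatMap] at hu
    obtain ⟨st, hst, hu⟩ := hu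
    by_cases hv : pvGetX dpC st = 0
    · rw [if_pos hv] at hu
      cases hu
    · rw [if_neg hv] at hu
      exact pvUpdList_inR M K pi st _ ((pvMem_states_inR M K st).mp hst) u hu
  have hLBin : ∀ u ∈ dpD.items.flatMap (fun it =>
      pvUpdList (M : Int) (K : Int) pi it.1 it.2), pvInR M K u.1 := by
    intro u hu
    rw [List.mem_flatMap] at hu
    obtain ⟨it, hit, hu⟩ := hu
    exact pvUpdList_inR M K pi it.1 it.2
      (hkInR _ (PySem.Dict.mem_keys_of_mem_items dpD hit)) u hu
  obtain ⟨hwfA, hcellA⟩ := pvMasterC M K _ _ (pvWfDim_init M K) hLAin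
  have hkeys := pvKeysD (dpD.items.flatMap (fun it =>
    pvUpdList (M : Int) (K : Int) pi it.1 it.2)) PySem.Dict.empty
    (by simp [PySem.Dict.keys_empty])
  -- the two weight sums agree at every target
  have hW : ∀ X : Int × Int × Int,
      pvWsum ((pvStates (M : Int) (K : Int)).flatMap (fun st =>
        if pvGetX dpC st = 0 then []
        else pvUpdList (M : Int) (K : Int) pi st (pvGetX dpC st))) X =
      pvWsum (dpD.items.flatMap (fun it =>
        pvUpdList (M : Int) (K : Int) pi it.1 it.2)) X := by
    intro X
    rw [pvWsum_flatMap, pvWsum_flatMap]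
    have hA : ∀ st ∈ pvStates (M : Int) (K : Int),
        pvWsum (if pvGetX dpC st = 0 then []
          else pvUpdList (M : Int) (K : Int) pi st (pvGetX dpC st)) X =
        pvGetX dpC st * pvWsum (pvUpdList (M : Int) (K : Int) pi st 1) X := by
      intro st _
      by_cases hv : pvGetX dpC st = 0
      · rw [if_pos hv, hv, zero_mul]
        simp [pvWsum]
      · rw [if_neg hv, pvUpdList_smul]
    rw [List.map_congr_left hA]
    have hB : dpD.items.map (fun it =>
        pvWsum (pvUpdList (M : Int) (K : Int) pi it.1 it.2) X) =
        dpD.keys.map (fun key =>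
          pvGetX dpC key * pvWsum (pvUpdList (M : Int) (K : Int) pi key 1) X) := by
      rw [PySem.Dict.items_eq_map_keys dpD hnod 0, List.map_map]
      apply List.map_congr_left
      intro key hkey
      show pvWsum (pvUpdList _ _ pi key (dpD.getD key 0)) X = _
      rw [pvUpdList_smul, hag key (hkInR key hkey)]
    rw [hB]
    symm
    apply pvSumSub
    · exact hnod
    · exact pvStates_nodup _ _
    · intro x hx
      exact (pvMem_states_inR M K x).mpr (hkInR x hx)
    · intro x hx hnx
      have hc : dpD.contains x = false := by
        by_contra hcc
        exact hnx ((PySem.Dict.contains_iff_mem_keys dpD x).mp (by simpa using hcc))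
      have : dpD.getD x 0 = 0 := PySem.Dict.getD_of_not_contains dpD 0 hc
      rw [← hag x ((pvMem_states_inR M K x).mp hx), this, zero_mul]
  refine ⟨by rw [← hmainA] at hwfA; exact hwfA, ?_, ?_, ?_⟩
  · rw [hstepB]
    exact hkeys.1
  · intro key hkey
    rw [hstepB] at hkey
    rcases hkeys.2 key hkey with hk | ⟨u, hu, rfl⟩
    · simp [PySem.Dict.keys_empty] at hk
    · exact hLBin u hu
  · intro X hX
    rw [hstepB, pvMasterD, hmainA, hcellA X hX, pvGetX_initCube, PySem.Dict.getD_empty]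
    have key : ∀ (tA tB : Bool) (WA WB : Int), WA = WB → (tA = false → WA = 0) →
        (tB = false → WB = 0) →
        (if tB = true then (0 + WB) % pvMod else 0) =
          (if tA = true then (0 + WA) % pvMod else 0) := by
      intro tA tB WA WB hEq hA0 hB0
      cases tA <;> cases tB
      · rfl
      · simp only [Bool.false_eq_true, reduceIte]
        rw [← hEq, hA0 rfl]
        norm_num
      · simp only [Bool.false_eq_true, reduceIte]
        rw [hEq, hB0 rfl]
        norm_num
      · simp only [reduceIte]
        rw [hEq]
    exact key _ _ _ _ (hW X)
      (fun ht => pvWsum_zero _ _ ht) (fun ht => pvWsum_zero _ _ ht)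


-- ---------- the tail sweep, as one weight-sum per cell ----------
def pvIo (a b u : Nat) : Int × Int × Int := ((a : Int), (b : Int), (u : Int))

def pvLT (M K : Nat) (d : List (List (List Int))) : List ((Int × Int × Int) × Int) :=
  (pvStates (M : Int) (K : Int)).flatMap (fun st =>
    if pvGetX d st = 0 then [] else pvTUpdList (K : Int) st (pvGetX d st))

theorem pvTail_foldl (M K : Nat) (d : List (List (List Int))) :
    pvTailStep (M : Int) (K : Int) d =
      (pvLT M K d).foldl pvApplyC (pvCubeInit (M : Int) (K : Int)) := by
  rw [pvTailStep_eq]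
  unfold pvLT
  rw [pvFoldlFlat]
  apply PySem.List.foldl_congr_mem
  intro acc st _
  by_cases hv : pvGetX d st = 0
  · rw [if_pos hv, if_pos hv]
    rfl
  · rw [if_neg hv, if_neg hv]

theorem pvLT_inR (M K : Nat) (d : List (List (List Int))) :
    ∀ u ∈ pvLT M K d, pvInR M K u.1 := by
  intro u hu
  unfold pvLT at hu
  rw [List.mem_flatMap] at hu
  obtain ⟨st, hst, hu⟩ := hu
  by_cases hv : pvGetX d st = 0
  · rw [if_pos hv] at hu
    cases hu
  · rw [if_neg hv] at hu
    exact pvTUpdList_inR M K st _ ((pvMem_states_inR M K st).mp hst) u hu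

theorem pvTail_wf (M K : Nat) (d : List (List (List Int))) :
    pvWfDim M K (pvTailStep (M : Int) (K : Int) d) := by
  rw [pvTail_foldl]
  exact (pvMasterC M K _ _ (pvWfDim_init M K) (pvLT_inR M K d)).1

theorem pvTail_cell (M K : Nat) (d : List (List (List Int))) (X : Int × Int × Int)
    (hX : pvInR M K X) :
    pvGetX (pvTailStep (M : Int) (K : Int) d) X % pvMod
        = pvGetX (pvTailStep (M : Int) (K : Int) d) X ∧
      pvGetX (pvTailStep (M : Int) (K : Int) d) X ≡ pvWsum (pvLT M K d) X [ZMOD pvMod] := by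
  rw [pvTail_foldl]
  rw [(pvMasterC M K _ _ (pvWfDim_init M K) (pvLT_inR M K d)).2 X hX, pvGetX_initCube]
  by_cases ht : pvTouch (pvLT M K d) X
  · rw [if_pos ht, zero_add]
    refine ⟨Int.emod_emod_of_dvd _ dvd_rfl, ?_⟩
    show _ % pvMod = _ % pvMod
    exact Int.emod_emod_of_dvd _ dvd_rfl
  · rw [if_neg (by simpa using ht), pvWsum_zero _ _ (by simpa using ht)]
    exact ⟨by norm_num, Int.ModEq.refl 0⟩

-- sums over the state list as nested range sums
theorem pvListSumRange (f : Nat → Int) (n : Nat) :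
    ((List.range n).map f).sum = ∑ i ∈ Finset.range n, f i := by
  induction n with
  | zero => simp
  | succ n ih => rw [List.range_succ, Finset.sum_range_succ]; simp [ih]

theorem pvSumFlatMap {σ τ : Type} (l : List σ) (f : σ → List τ) (g : τ → Int) :
    ((l.flatMap f).map g).sum = (l.map (fun x => ((f x).map g).sum)).sum := by
  induction l with
  | nil => simp
  | cons x xs ih => simp [List.flatMap_cons, ih]

theorem pvPyRangeNat (N : Nat) :
    PySem.List.pyRange 0 (N : Int) 1 = (List.range N).map (fun t : Nat => (t : Int)) := by
  apply List.ext_getElem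
  · simp [PySem.List.length_pyRange_one]
  · intro i h1 h2
    rw [PySem.List.getElem_pyRange_one]
    simp

theorem pvSumPyRange (N : Nat) (f : Int → Int) :
    ((PySem.List.pyRange 0 ((N : Int) + 1) 1).map f).sum =
      ∑ i ∈ Finset.range (N + 1), f (i : Int) := by
  rw [show ((N : Int) + 1) = ((N + 1 : Nat) : Int) by push_cast; ring,
    pvPyRangeNat, List.map_map, pvListSumRange]
  rfl

theorem pvSum_states (M K : Nat) (g : (Int × Int × Int) → Int) :
    ((pvStates (M : Int) (K : Int)).map g).sum =
      ∑ a ∈ Finset.range (M + 1), ∑ b ∈ Finset.range (K + 1), ∑ u ∈ Finset.range (M + 1),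
        g (pvIo a b u) := by
  unfold pvStates
  rw [pvSumFlatMap, pvSumPyRange M]
  apply Finset.sum_congr rfl
  intro a _
  rw [pvSumFlatMap, pvSumPyRange K]
  apply Finset.sum_congr rfl
  intro b _
  rw [List.map_map, pvSumPyRange M]
  rfl

-- the tail weight-sum, evaluated as an indicator sum over Nat states
theorem pvWsum_LT_eval (M K : Nat) (d : List (List (List Int))) (X : Int × Int × Int) :
    pvWsum (pvLT M K d) X =
      ∑ a ∈ Finset.range (M + 1), ∑ b ∈ Finset.range (K + 1), ∑ u ∈ Finset.range (M + 1),
        (if b + a % 2 ≤ K ∧ pvIo (a / 2) (b + a % 2) u = X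
          then pvGetX d (pvIo a b u) else 0) := by
  unfold pvLT
  rw [pvWsum_flatMap]
  have h1 : ∀ st ∈ pvStates (M : Int) (K : Int),
      pvWsum (if pvGetX d st = 0 then [] else pvTUpdList (K : Int) st (pvGetX d st)) X =
        (if ¬ ((K : Int) < st.2.1 + PySem.Int.band st.1 1) ∧
            (st.1 >>> (1 : Nat), st.2.1 + PySem.Int.band st.1 1, st.2.2) = X
          then pvGetX d st else 0) := by
    intro st _
    by_cases hv : pvGetX d st = 0
    · rw [if_pos hv, hv]
      simp [pvWsum]
    · rw [if_neg hv]
      unfold pvTUpdList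
      by_cases hg : (K : Int) < st.2.1 + PySem.Int.band st.1 1
      · rw [if_pos hg]
        simp [pvWsum, hg]
      · rw [if_neg hg]
        by_cases hx : ((st.1 >>> (1 : Nat), st.2.1 + PySem.Int.band st.1 1, st.2.2) :
            Int × Int × Int) = X
        · simp [pvWsum, hx, hg]
        · simp [pvWsum, hx, hg]
  rw [List.map_congr_left h1, pvSum_states]
  apply Finset.sum_congr rfl
  intro a _
  apply Finset.sum_congr rfl
  intro b _
  apply Finset.sum_congr rfl
  intro u _
  dsimp only [pvIo]
  simp only [pvBandOne, pvShiftOne]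
  have e1 : (¬ ((K : Int) < (b : Int) + ((a % 2 : Nat) : Int))) ↔ (b + a % 2 ≤ K) := by
    push_cast
    omega
  have e2 : ((((a / 2 : Nat) : Int), (b : Int) + ((a % 2 : Nat) : Int), (u : Int)) :
      Int × Int × Int) = pvIo (a / 2) (b + a % 2) u := by
    unfold pvIo
    push_cast
    rfl
  simp only [e1, e2]
  rfl


-- ---------- popcount and the flush-readout chain ----------
def pvPc (n : Nat) : Nat := PySem.Int.bitCount (n : Int)

def pvGterm (M K : Nat) (d : List (List (List Int))) (a : Nat) : Int :=
  if pvPc a ≤ K then pvGetX d (pvIo a (K - pvPc a) M) else 0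

def pvGsum (M K j : Nat) (d : List (List (List Int))) : Int :=
  ∑ a ∈ Finset.range (2 ^ j), pvGterm M K d a

theorem pvPc_zero : pvPc 0 = 0 := by simp [pvPc]

theorem pvPc_even (c : Nat) : pvPc (2 * c) = pvPc c := by
  rcases Nat.eq_zero_or_pos c with rfl | hc
  · rfl
  · unfold pvPc
    rw [PySem.Int.bitCount_natCast (by omega : 0 < 2 * c)]
    rw [show (2 * c) % 2 = 0 by omega, show (2 * c) / 2 = c by omega]
    omega

theorem pvPc_odd (c : Nat) : pvPc (2 * c + 1) = pvPc c + 1 := by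
  unfold pvPc
  rw [PySem.Int.bitCount_natCast (by omega : 0 < 2 * c + 1)]
  rw [show (2 * c + 1) % 2 = 1 by omega, show (2 * c + 1) / 2 = c by omega]
  omega

theorem pvSum1 (N U : Nat) (h : Nat → Int) :
    (∑ u ∈ Finset.range N, if u = U then h u else 0) = if U < N then h U else 0 := by
  rw [Finset.sum_ite_eq' (Finset.range N) U h]
  simp [Finset.mem_range]

theorem pvSum3 (NA NB NU A B U : Nat) (g : Nat → Nat → Nat → Int) :
    (∑ a ∈ Finset.range NA, ∑ b ∈ Finset.range NB, ∑ u ∈ Finset.range NU,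
      if a = A ∧ b = B ∧ u = U then g a b u else 0) =
      if A < NA ∧ B < NB ∧ U < NU then g A B U else 0 := by
  have h1 : ∀ a b : Nat,
      (∑ u ∈ Finset.range NU, if a = A ∧ b = B ∧ u = U then g a b u else 0) =
        if a = A ∧ b = B then (if U < NU then g a b U else 0) else 0 := by
    intro a b
    by_cases hab : a = A ∧ b = B
    · rw [if_pos hab]
      have : ∀ u : Nat, (if a = A ∧ b = B ∧ u = U then g a b u else 0) =
          (if u = U then g a b u else 0) := by
        intro u
        by_cases hu : u = U
        · rw [if_pos hu, if_pos ⟨hab.1, hab.2, hu⟩]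
        · rw [if_neg hu, if_neg (by tauto)]
      rw [Finset.sum_congr rfl (fun u _ => this u), pvSum1]
    · rw [if_neg hab]
      apply Finset.sum_eq_zero
      intro u _
      rw [if_neg (by tauto)]
  have h2 : ∀ a : Nat,
      (∑ b ∈ Finset.range NB, ∑ u ∈ Finset.range NU,
        if a = A ∧ b = B ∧ u = U then g a b u else 0) =
        if a = A then (if B < NB then (if U < NU then g a B U else 0) else 0) else 0 := by
    intro a
    rw [Finset.sum_congr rfl (fun b _ => h1 a b)]
    by_cases ha : a = A
    · rw [if_pos ha]
      have : ∀ b : Nat, (if a = A ∧ b = B then (if U < NU then g a b U else 0) else 0) =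
          (if b = B then (if U < NU then g a b U else 0) else 0) := by
        intro b
        by_cases hb : b = B
        · rw [if_pos hb, if_pos ⟨ha, hb⟩]
        · rw [if_neg hb, if_neg (by tauto)]
      rw [Finset.sum_congr rfl (fun b _ => this b), pvSum1 NB B, ha]
    · rw [if_neg ha]
      apply Finset.sum_eq_zero
      intro b _
      rw [if_neg (by tauto)]
  rw [Finset.sum_congr rfl (fun a _ => h2 a), pvSum1 NA A]
  split_ifs <;> first | rfl | tauto

theorem pvSumRangeDouble (f : Nat → Int) (n : Nat) :
    ∑ i ∈ Finset.range (2 * n), f i =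
      ∑ i ∈ Finset.range n, (f (2 * i) + f (2 * i + 1)) := by
  induction n with
  | zero => simp
  | succ n ih =>
    rw [show 2 * (n + 1) = (2 * n + 1) + 1 by omega, Finset.sum_range_succ,
      Finset.sum_range_succ, Finset.sum_range_succ, ih]
    ring_nf

theorem pvModEq_sum (s : Finset Nat) (f g : Nat → Int) (n : Int)
    (h : ∀ i ∈ s, f i ≡ g i [ZMOD n]) : (∑ i ∈ s, f i) ≡ (∑ i ∈ s, g i) [ZMOD n] := by
  show _ % n = _ % n
  rw [Finset.sum_int_mod s n f, Finset.sum_int_mod s n g]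
  congr 1
  exact Finset.sum_congr rfl h

theorem pvGterm_tail (M K : Nat) (d : List (List (List Int))) (hwf : pvWfDim M K d)
    (c2 : Nat) :
    pvGterm M K (pvTailStep (M : Int) (K : Int) d) c2 ≡
      pvGterm M K d (2 * c2) + pvGterm M K d (2 * c2 + 1) [ZMOD pvMod] := by
  by_cases hpc : pvPc c2 ≤ K
  · by_cases hc2 : c2 ≤ M
    · have hX : pvInR M K (pvIo c2 (K - pvPc c2) M) := by
        unfold pvInR pvIo
        dsimp only
        refine ⟨by positivity, by exact_mod_cast hc2, by positivity,
          by exact_mod_cast Nat.sub_le K (pvPc c2), by positivity, le_refl _⟩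
      obtain ⟨_, hcong⟩ := pvTail_cell M K d _ hX
      unfold pvGterm
      rw [if_pos hpc, pvPc_even, pvPc_odd, if_pos hpc]
      refine hcong.trans ?_
      rw [pvWsum_LT_eval]
      have hsplit : ∀ a b u : Nat,
          (if b + a % 2 ≤ K ∧ pvIo (a / 2) (b + a % 2) u = pvIo c2 (K - pvPc c2) M
            then pvGetX d (pvIo a b u) else 0) =
          (if a = 2 * c2 ∧ b = K - pvPc c2 ∧ u = M then pvGetX d (pvIo a b u) else 0) +
            (if 1 ≤ K - pvPc c2 then
              (if a = 2 * c2 + 1 ∧ b = K - pvPc c2 - 1 ∧ u = M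
                then pvGetX d (pvIo a b u) else 0) else 0) := by
        intro a b u
        have hio : (pvIo (a / 2) (b + a % 2) u = pvIo c2 (K - pvPc c2) M) ↔
            (a / 2 = c2 ∧ b + a % 2 = K - pvPc c2 ∧ u = M) := by
          unfold pvIo
          simp only [Prod.mk.injEq, Nat.cast_inj]
        simp only [hio]
        by_cases hC : b + a % 2 ≤ K ∧ a / 2 = c2 ∧ b + a % 2 = K - pvPc c2 ∧ u = M
        · rw [if_pos hC]
          obtain ⟨hC1, hC2, hC3, hC4⟩ := hC
          subst hC4
          by_cases he : a = 2 * c2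
          · have hb : b = K - pvPc c2 := by omega
            rw [if_pos ⟨he, hb, rfl⟩]
            have hz : (if a = 2 * c2 + 1 ∧ b = K - pvPc c2 - 1 ∧ u = u
                then pvGetX d (pvIo a b u) else 0) = 0 :=
              if_neg (by rintro ⟨h, -, -⟩; omega)
            rw [hz, ite_self]
            ring
          · have ho : a = 2 * c2 + 1 := by omega
            have hb1 : 1 ≤ K - pvPc c2 := by omega
            have hb : b = K - pvPc c2 - 1 := by omega
            rw [if_neg (by rintro ⟨h, -, -⟩; omega), if_pos hb1, if_pos ⟨ho, hb, rfl⟩]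
            ring
        · rw [if_neg hC]
          have hA' : ¬ (a = 2 * c2 ∧ b = K - pvPc c2 ∧ u = M) := by
            rintro ⟨h1, h2, h3⟩
            exact hC ⟨by omega, by omega, by omega, h3⟩
          by_cases hb1 : 1 ≤ K - pvPc c2
          · have hB' : ¬ (a = 2 * c2 + 1 ∧ b = K - pvPc c2 - 1 ∧ u = M) := by
              rintro ⟨h1, h2, h3⟩
              exact hC ⟨by omega, by omega, by omega, h3⟩
            rw [if_neg hA', if_pos hb1, if_neg hB']
            norm_num
          · rw [if_neg hA', if_neg hb1]
            norm_num
      rw [Finset.sum_congr rfl (fun a _ => Finset.sum_congr rfl (fun b _ =>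
        Finset.sum_congr rfl (fun u _ => hsplit a b u)))]
      rw [Finset.sum_congr rfl (fun a _ => Finset.sum_congr rfl (fun b _ =>
        Finset.sum_add_distrib)),
        Finset.sum_congr rfl (fun a _ => Finset.sum_add_distrib), Finset.sum_add_distrib]
      have hA : (∑ a ∈ Finset.range (M + 1), ∑ b ∈ Finset.range (K + 1),
          ∑ u ∈ Finset.range (M + 1),
          if a = 2 * c2 ∧ b = K - pvPc c2 ∧ u = M then pvGetX d (pvIo a b u) else 0) =
          pvGetX d (pvIo (2 * c2) (K - pvPc c2) M) := by
        rw [pvSum3]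
        by_cases h2 : 2 * c2 < M + 1
        · rw [if_pos ⟨h2, by omega, by omega⟩]
        · rw [if_neg (by tauto), pvGetX_high M d hwf.1 _ (by
            show (M : Int) < ((2 * c2 : Nat) : Int)
            exact_mod_cast by omega)]
      have hB : (∑ a ∈ Finset.range (M + 1), ∑ b ∈ Finset.range (K + 1),
          ∑ u ∈ Finset.range (M + 1),
          if 1 ≤ K - pvPc c2 then
            (if a = 2 * c2 + 1 ∧ b = K - pvPc c2 - 1 ∧ u = M
              then pvGetX d (pvIo a b u) else 0) else 0) =
          (if pvPc c2 + 1 ≤ K then pvGetX d (pvIo (2 * c2 + 1) (K - (pvPc c2 + 1)) M)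
            else 0) := by
        by_cases hb1 : 1 ≤ K - pvPc c2
        · simp only [if_pos hb1]
          rw [pvSum3]
          have he : K - pvPc c2 - 1 = K - (pvPc c2 + 1) := by omega
          by_cases h2 : 2 * c2 + 1 < M + 1
          · rw [if_pos ⟨h2, by omega, by omega⟩, if_pos (by omega), he]
          · rw [if_neg (by tauto), if_pos (by omega),
              pvGetX_high M d hwf.1 _ (by
                show (M : Int) < ((2 * c2 + 1 : Nat) : Int)
                exact_mod_cast by omega)]
        · simp only [if_neg hb1]
          rw [if_neg (by omega)]
          simp
      rw [hA, hB]
    · have hL : pvGetX (pvTailStep (M : Int) (K : Int) d) (pvIo c2 (K - pvPc c2) M) = 0 :=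
        pvGetX_high M _ (pvTail_wf M K d).1 _ (by
          show (M : Int) < ((c2 : Nat) : Int)
          exact_mod_cast by omega)
      have h1 : pvGetX d (pvIo (2 * c2) (K - pvPc c2) M) = 0 :=
        pvGetX_high M d hwf.1 _ (by
          show (M : Int) < ((2 * c2 : Nat) : Int)
          exact_mod_cast by omega)
      unfold pvGterm
      rw [pvPc_even, pvPc_odd, if_pos hpc, if_pos hpc, hL, h1]
      by_cases hk : pvPc c2 + 1 ≤ K
      · rw [if_pos hk, pvGetX_high M d hwf.1 _ (by
          show (M : Int) < ((2 * c2 + 1 : Nat) : Int)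
          exact_mod_cast by omega)]
        norm_num
      · rw [if_neg hk]
        norm_num
  · unfold pvGterm
    rw [pvPc_even, pvPc_odd, if_neg hpc, if_neg hpc, if_neg (by omega)]
    norm_num

theorem pvGstep (M K : Nat) (d : List (List (List Int))) (hwf : pvWfDim M K d) (j : Nat) :
    pvGsum M K j (pvTailStep (M : Int) (K : Int) d) ≡ pvGsum M K (j + 1) d [ZMOD pvMod] := by
  unfold pvGsum
  refine (pvModEq_sum (Finset.range (2 ^ j)) _
    (fun c2 => pvGterm M K d (2 * c2) + pvGterm M K d (2 * c2 + 1)) pvMod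
    (fun i _ => pvGterm_tail M K d hwf i)).trans ?_
  rw [show (2 : Nat) ^ (j + 1) = 2 * 2 ^ j by ring, pvSumRangeDouble]


-- ---------- A's mutated power row = B's comprehension row ----------
theorem pvPass1 (M : Nat) (x : Int) (j : Nat) (hj : j ≤ M) :
    (PySem.List.pyRange 1 ((j : Int) + 1) 1).foldl
      (fun r c => PySem.List.pySetD r c
        (PySem.Int.mod (PySem.List.pyGetD r (c - 1) 0 * x) pvMod))
      ((List.replicate (M + 1) (0 : Int)).set 0 1) =
    (List.range (j + 1)).map (fun c => PySem.Int.mod (x ^ c) pvMod)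
      ++ List.replicate (M - j) (0 : Int) := by
  induction j with
  | zero =>
    rw [PySem.List.pyRange_one_eq_nil (by norm_num)]
    rw [show (List.replicate (M + 1) (0 : Int)) = 0 :: List.replicate M 0 from rfl]
    show (1 : Int) :: List.replicate M 0 = _
    simp only [List.range_succ, List.range_zero, List.nil_append, List.map_cons,
      List.map_nil, pow_zero, Nat.sub_zero, List.singleton_append]
    rw [pvModE]
    norm_num [pvMod]
  | succ j ih =>
    rw [show (((j + 1 : Nat) : Int) + 1) = (((j : Int) + 1) + 1) by push_cast; ring,
      PySem.List.pyRange_one_succ_right (by omega), List.foldl_append, ih (by omega),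
      List.foldl_cons, List.foldl_nil]
    have hgl : PySem.List.pyGetD
        ((List.range (j + 1)).map (fun c => PySem.Int.mod (x ^ c) pvMod) ++
          List.replicate (M - j) (0 : Int)) (((j : Int) + 1) - 1) 0 =
        PySem.Int.mod (x ^ j) pvMod := by
      rw [show ((j : Int) + 1) - 1 = ((j : Nat) : Int) by ring, PySem.List.pyGetD_natCast]
      rw [List.getD_append _ _ _ _ (by simp)]
      rw [List.getD_eq_getElem _ _ (by simp)]
      simp
    rw [hgl]
    rw [show ((j : Int) + 1) = ((j + 1 : Nat) : Int) by push_cast; ring,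
      PySem.List.pySetD_natCast]
    rw [List.set_append_right _ _ (by simp)]
    rw [show (List.replicate (M - j) (0 : Int)) = 0 :: List.replicate (M - j - 1) 0 by
      rw [show M - j = (M - j - 1) + 1 by omega]; rfl]
    simp only [List.length_map, List.length_range, Nat.sub_self, List.set_cons_zero]
    have hmod : PySem.Int.mod (PySem.Int.mod (x ^ j) pvMod * x) pvMod =
        PySem.Int.mod (x ^ (j + 1)) pvMod := by
      rw [pvModE, pvModE, pvModE, Int.mul_emod, Int.emod_emod_of_dvd _ dvd_rfl,
        ← Int.mul_emod, pow_succ]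
    rw [hmod]
    rw [show M - (j + 1) = M - j - 1 from rfl]
    simp [List.range_succ, List.append_assoc]

theorem pvPass2 {α : Type} (g : α → Int → α) (dflt : α) (j : Nat) :
    ∀ (l : List α), j ≤ l.length →
    (PySem.List.pyRange 0 (j : Int) 1).foldl
      (fun r c => PySem.List.pySetD r c (g (PySem.List.pyGetD r c dflt) c)) l =
    (List.range j).map (fun i => g (l.getD i dflt) (i : Int)) ++ l.drop j := by
  induction j with
  | zero =>
    intro l _
    rw [PySem.List.pyRange_one_eq_nil (by norm_num)]
    simp
  | succ j ih =>
    intro l hj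
    rw [show ((j + 1 : Nat) : Int) = ((j : Int) + 1) by push_cast; ring,
      PySem.List.pyRange_one_succ_right (by positivity), List.foldl_append,
      ih l (by omega), List.foldl_cons, List.foldl_nil]
    have hdl : PySem.List.pyGetD
        ((List.range j).map (fun i => g (l.getD i dflt) (i : Int)) ++ l.drop j)
        ((j : Nat) : Int) dflt = l.getD j dflt := by
      rw [PySem.List.pyGetD_natCast]
      rw [List.getD_append_right _ _ _ _ (by simp)]
      simp only [List.length_map, List.length_range, Nat.sub_self]
      rw [List.getD_eq_getElem?_getD, List.getElem?_drop, List.getD_eq_getElem?_getD,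
        Nat.add_zero]
    rw [hdl, PySem.List.pySetD_natCast, List.set_append_right _ _ (by simp)]
    simp only [List.length_map, List.length_range, Nat.sub_self]
    rw [List.drop_eq_getElem_cons (by omega), List.set_cons_zero]
    rw [List.range_succ, List.map_append, List.append_assoc]
    simp only [List.map_cons, List.map_nil, List.cons_append, List.nil_append]

theorem pvRow_eq (M : Nat) (x : Int) (invf : List Int) :
    pvRow (M : Int) x invf = pvRowB (M : Int) x invf := by
  unfold pvRow pvRowB
  dsimp only
  have h0 : PySem.List.pySetD (List.replicate ((M : Int) + 1).toNat (0 : Int)) 0 1 =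
      (List.replicate (M + 1) (0 : Int)).set 0 1 := by
    rw [show (0 : Int) = ((0 : Nat) : Int) from rfl, PySem.List.pySetD_natCast]
    rw [show ((M : Int) + 1).toNat = M + 1 by omega]
  rw [h0, pvPass1 M x M (le_refl M)]
  rw [show ((M : Int) + 1) = ((M + 1 : Nat) : Int) by push_cast; ring]
  rw [pvPass2 (fun v c => PySem.Int.mod (v * PySem.List.pyGetD invf c 0) pvMod)
    (0 : Int) (M + 1) _ (by simp)]
  rw [List.drop_eq_nil_of_le (by simp), List.append_nil]
  rw [pvPyRangeNat, List.map_map]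
  apply List.map_congr_left
  intro i hi
  rw [List.mem_range] at hi
  simp only [Function.comp_apply]
  rw [List.getD_append _ _ _ _ (by simp [hi]), List.getD_eq_getElem _ _ (by simp [hi])]
  simp only [List.getElem_map, List.getElem_range]
  rw [pvPowMod_eq _ _ pvMod_pos]
  simp only [Int.toNat_natCast]
  rfl


-- ---------- folding the whole input, initial state, readout ----------
theorem pvFold_pres (M K : Nat) (inv : List Int) (nums : List Int) :
    ∀ (dpC : List (List (List Int))) (dpD : PySem.Dict (Int × Int × Int) Int),
      pvAgrees M K dpC dpD →
      pvAgrees M K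
        (nums.foldl (fun dp x => pvMainStep (M : Int) (K : Int) (pvRow (M : Int) x inv) dp) dpC)
        (nums.foldl (fun dp x => pvStepB (M : Int) (K : Int) (pvRowB (M : Int) x inv) dp) dpD) := by
  induction nums with
  | nil => intro _ _ h; exact h
  | cons x xs ih =>
    intro dpC dpD h
    rw [List.foldl_cons, List.foldl_cons]
    apply ih
    rw [← pvRow_eq]
    exact pvStep_pres M K _ dpC dpD h

theorem pvInit_agrees (M K : Nat) :
    pvAgrees M K (pvCubeSet (pvCubeInit (M : Int) (K : Int)) 0 0 0 1)
      (PySem.Dict.ofList [((0, 0, 0), 1)]) := by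
  have hu : pvInR M K (((0 : Int), (0 : Int), (0 : Int))) := by
    unfold pvInR
    refine ⟨le_refl _, by positivity, le_refl _, by positivity, le_refl _, by positivity⟩
  have hD : (PySem.Dict.ofList [(((0 : Int), (0 : Int), (0 : Int)), (1 : Int))]) =
      PySem.Dict.empty.insert ((0 : Int), (0 : Int), (0 : Int)) 1 := rfl
  refine ⟨?_, ?_, ?_, ?_⟩
  · exact pvWfDim_set M K _ (pvWfDim_init M K) (((0 : Int), (0 : Int), (0 : Int))) hu 1
  · decide
  · intro key hkey
    have hk : (PySem.Dict.ofList [(((0 : Int), (0 : Int), (0 : Int)), (1 : Int))]).keys =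
        [((0 : Int), (0 : Int), (0 : Int))] := rfl
    rw [hk, List.mem_singleton] at hkey
    subst hkey
    exact hu
  · intro X hX
    have hset : pvGetX (pvCubeSet (pvCubeInit (M : Int) (K : Int)) 0 0 0 1) X =
        if X = ((0 : Int), (0 : Int), (0 : Int)) then 1
        else pvGetX (pvCubeInit (M : Int) (K : Int)) X :=
      pvGetX_set M K _ (pvWfDim_init M K) (((0 : Int), (0 : Int), (0 : Int))) X 1 hu hX
    rw [hset, pvGetX_initCube, hD, PySem.Dict.getD_insert]
    simp [PySem.Dict.getD_empty]

theorem pvFoldMod (g : Int → Int) (l : List Int) :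
    ∀ a : Int, l.foldl (fun F t => PySem.Int.mod (F + g t) pvMod) (a % pvMod) =
      (a + (l.map g).sum) % pvMod := by
  induction l with
  | nil => intro a; simp
  | cons t l ih =>
    intro a
    rw [List.foldl_cons, pvModE, Int.emod_add_emod, ih (a + g t), List.map_cons,
      List.sum_cons]
    ring_nf

theorem pvFoldMod0 (g : Int → Int) (l : List Int) :
    l.foldl (fun F t => PySem.Int.mod (F + g t) pvMod) 0 = (l.map g).sum % pvMod := by
  have h := pvFoldMod g l 0
  rw [show ((0 : Int) % pvMod) = 0 by norm_num [pvMod], zero_add] at h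
  exact h

theorem magicalSum_eq_alt (M K : Nat) (hM : M < 64) (nums : List Int) :
    magicalSum (M : Int) (K : Int) nums = magicalSum_alt (M : Int) (K : Int) nums := by
  unfold magicalSum magicalSum_alt
  dsimp only
  have hn : PySem.List.len nums = ((nums.length : Nat) : Int) := PySem.List.len_eq nums
  rw [hn]
  set N := nums.length with hN
  set inv := pvInvFact (M : Int) (pvFact (M : Int)) with hinv
  -- the pw table is the list of rows of nums
  have hpw : (PySem.List.pyRange 0 (N : Int) 1).foldl
      (fun pw i => PySem.List.pySetD pw i
        (pvRow (M : Int) (PySem.List.pyGetD nums i 0) inv))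
      ((PySem.List.pyRange 0 (N : Int) 1).map
        (fun _ => List.replicate ((M : Int) + 1).toNat (0 : Int)))
      = (List.range N).map
          (fun t : Nat => pvRow (M : Int) (PySem.List.pyGetD nums (t : Int) 0) inv) := by
    rw [pvPass2 (fun _ c => pvRow (M : Int) (PySem.List.pyGetD nums c 0) inv)
      ([] : List Int) N _ (by simp [PySem.List.length_pyRange_one])]
    rw [List.drop_eq_nil_of_le (by simp [PySem.List.length_pyRange_one]), List.append_nil]
  rw [hpw]
  -- split the L = n + 6 loop into the n main sweeps and the 6 flush sweeps
  rw [PySem.List.pyRange_one_append 0 (N : Int) ((N : Int) + 6) (by positivity) (by omega),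
    List.foldl_append]
  -- first segment: each i < n applies the main sweep with row i
  have e1 : ∀ (dp : List (List (List Int))) (i : Int),
      i ∈ PySem.List.pyRange 0 (N : Int) 1 →
      (if i < (N : Int) then
        pvMainStep (M : Int) (K : Int) (PySem.List.pyGetD ((List.range N).map
          (fun t : Nat => pvRow (M : Int) (PySem.List.pyGetD nums (t : Int) 0) inv)) i []) dp
      else pvTailStep (M : Int) (K : Int) dp)
      = pvMainStep (M : Int) (K : Int) (pvRow (M : Int) (PySem.List.pyGetD nums i 0) inv)
          dp := by
    intro dp i hi
    rw [PySem.List.mem_pyRange_one] at hi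
    rw [if_pos hi.2]
    congr 1
    rw [pvPyGetD _ _ _ hi.1]
    rw [List.getD_eq_getElem _ _ (by rw [List.length_map, List.length_range]; omega)]
    simp only [List.getElem_map, List.getElem_range]
    rw [Int.toNat_of_nonneg hi.1]
  rw [PySem.List.foldl_congr_mem _ _
    (fun dp i => pvMainStep (M : Int) (K : Int)
      (pvRow (M : Int) (PySem.List.pyGetD nums i 0) inv) dp) _ e1]
  have e2 := PySem.List.foldl_pyRange_pyGetD nums (0 : Int)
    (fun dp x => pvMainStep (M : Int) (K : Int) (pvRow (M : Int) x inv) dp)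
    (pvCubeSet (pvCubeInit (M : Int) (K : Int)) 0 0 0 1) (le_refl 0)
  rw [hn, Int.toNat_zero, List.drop_zero] at e2
  rw [e2]
  -- second segment: six flush sweeps
  have e3 : ∀ (dp : List (List (List Int))) (i : Int),
      i ∈ PySem.List.pyRange (N : Int) ((N : Int) + 6) 1 →
      (if i < (N : Int) then
        pvMainStep (M : Int) (K : Int) (PySem.List.pyGetD ((List.range N).map
          (fun t : Nat => pvRow (M : Int) (PySem.List.pyGetD nums (t : Int) 0) inv)) i []) dp
      else pvTailStep (M : Int) (K : Int) dp)
      = pvTailStep (M : Int) (K : Int) dp := by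
    intro dp i hi
    rw [PySem.List.mem_pyRange_one] at hi
    rw [if_neg (by omega)]
  rw [PySem.List.foldl_congr_mem _ _
    (fun dp (_ : Int) => pvTailStep (M : Int) (K : Int) dp) _ e3]
  rw [PySem.List.pyRange_one_cons (by omega), PySem.List.pyRange_one_cons (by omega),
    PySem.List.pyRange_one_cons (by omega), PySem.List.pyRange_one_cons (by omega),
    PySem.List.pyRange_one_cons (by omega), PySem.List.pyRange_one_cons (by omega),
    PySem.List.pyRange_one_eq_nil (by omega)]
  simp only [List.foldl_cons, List.foldl_nil]
  -- names for the two end states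
  have hAg := pvFold_pres M K inv nums
    (pvCubeSet (pvCubeInit (M : Int) (K : Int)) 0 0 0 1)
    (PySem.Dict.ofList [((0, 0, 0), 1)]) (pvInit_agrees M K)
  set dpMain := nums.foldl
    (fun dp x => pvMainStep (M : Int) (K : Int) (pvRow (M : Int) x inv) dp)
    (pvCubeSet (pvCubeInit (M : Int) (K : Int)) 0 0 0 1) with hdpMain
  set dpN := nums.foldl
    (fun dp x => pvStepB (M : Int) (K : Int) (pvRowB (M : Int) x inv) dp)
    (PySem.Dict.ofList [((0, 0, 0), 1)]) with hdpN
  -- B's readout is the popcount sum mod p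
  rw [pvFoldMod0 (fun carry =>
    dpN.getD (carry, (K : Int) - (PySem.Int.bitCount carry : Int), (M : Int)) 0)]
  rw [pvSumPyRange M (fun carry =>
    dpN.getD (carry, (K : Int) - (PySem.Int.bitCount carry : Int), (M : Int)) 0)]
  have hg : ∀ i ∈ Finset.range (M + 1),
      dpN.getD (((i : Nat) : Int),
        (K : Int) - (PySem.Int.bitCount ((i : Nat) : Int) : Int), (M : Int)) 0 =
      pvGterm M K dpMain i := by
    intro i hi
    rw [Finset.mem_range] at hi
    by_cases hpc : pvPc i ≤ K
    · have hkey : ((((i : Nat) : Int),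
          (K : Int) - (PySem.Int.bitCount ((i : Nat) : Int) : Int), (M : Int)) :
          Int × Int × Int) = pvIo i (K - pvPc i) M := by
        unfold pvIo pvPc
        rw [Nat.cast_sub (show PySem.Int.bitCount ((i : Nat) : Int) ≤ K from hpc)]
      rw [hkey]
      have hIn : pvInR M K (pvIo i (K - pvPc i) M) := by
        unfold pvInR pvIo
        dsimp only
        refine ⟨by positivity, by exact_mod_cast (show i ≤ M by omega), by positivity,
          by exact_mod_cast Nat.sub_le K (pvPc i), by positivity, le_refl _⟩
      rw [hAg.2.2.2 _ hIn]
      unfold pvGterm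
      rw [if_pos hpc]
    · have hneg : (K : Int) - (PySem.Int.bitCount ((i : Nat) : Int) : Int) < 0 := by
        unfold pvPc at hpc
        omega
      have hcon : dpN.contains (((i : Nat) : Int),
          (K : Int) - (PySem.Int.bitCount ((i : Nat) : Int) : Int), (M : Int)) = false := by
        by_contra hc
        have hct : dpN.contains (((i : Nat) : Int),
            (K : Int) - (PySem.Int.bitCount ((i : Nat) : Int) : Int), (M : Int)) = true := by
          revert hc
          cases dpN.contains (((i : Nat) : Int),
            (K : Int) - (PySem.Int.bitCount ((i : Nat) : Int) : Int), (M : Int)) <;> simp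
        have hIn := hAg.2.2.1 _ ((PySem.Dict.contains_iff_mem_keys _ _).mp hct)
        have h0 : (0 : Int) ≤ (K : Int) - (PySem.Int.bitCount ((i : Nat) : Int) : Int) :=
          hIn.2.2.1
        omega
      rw [PySem.Dict.getD_of_not_contains _ _ hcon]
      unfold pvGterm
      rw [if_neg hpc]
  rw [Finset.sum_congr rfl hg]
  have hsum : (∑ i ∈ Finset.range (M + 1), pvGterm M K dpMain i) =
      pvGsum M K 6 dpMain := by
    unfold pvGsum
    rw [show (2 : Nat) ^ 6 = 64 by norm_num]
    refine Finset.sum_subset (by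
      intro y hy
      rw [Finset.mem_range] at *
      omega) ?_
    intro x _ hx
    have hx' : M < x := by
      by_contra hcon
      exact hx (Finset.mem_range.mpr (by omega))
    unfold pvGterm
    by_cases hpcx : pvPc x ≤ K
    · rw [if_pos hpcx, pvGetX_high M dpMain hAg.1.1 _ (by
        show (M : Int) < ((x : Nat) : Int)
        exact_mod_cast hx')]
    · rw [if_neg hpcx]
  rw [hsum]
  -- A's readout equals the same value
  have hX0 : pvInR M K (pvIo 0 K M) := by
    unfold pvInR pvIo
    dsimp only
    refine ⟨by positivity, by positivity, by positivity, le_refl _, by positivity,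
      le_refl _⟩
  have hF : pvCubeGet
      (pvTailStep (M : Int) (K : Int) (pvTailStep (M : Int) (K : Int)
        (pvTailStep (M : Int) (K : Int) (pvTailStep (M : Int) (K : Int)
          (pvTailStep (M : Int) (K : Int) (pvTailStep (M : Int) (K : Int) dpMain))))))
      0 (K : Int) (M : Int) = pvGsum M K 6 dpMain % pvMod := by
    have hG : pvCubeGet
        (pvTailStep (M : Int) (K : Int) (pvTailStep (M : Int) (K : Int)
          (pvTailStep (M : Int) (K : Int) (pvTailStep (M : Int) (K : Int)
            (pvTailStep (M : Int) (K : Int) (pvTailStep (M : Int) (K : Int) dpMain))))))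
        0 (K : Int) (M : Int) = pvGetX
        (pvTailStep (M : Int) (K : Int) (pvTailStep (M : Int) (K : Int)
          (pvTailStep (M : Int) (K : Int) (pvTailStep (M : Int) (K : Int)
            (pvTailStep (M : Int) (K : Int) (pvTailStep (M : Int) (K : Int) dpMain))))))
        (pvIo 0 K M) := rfl
    rw [hG]
    have hstart : ∀ d : List (List (List Int)), pvGetX d (pvIo 0 K M) = pvGsum M K 0 d := by
      intro d
      unfold pvGsum
      rw [show (2 : Nat) ^ 0 = 1 from rfl, Finset.sum_range_one]
      unfold pvGterm
      rw [if_pos (by rw [pvPc_zero]; omega), pvPc_zero, Nat.sub_zero]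
    have hred := (pvTail_cell M K
      (pvTailStep (M : Int) (K : Int) (pvTailStep (M : Int) (K : Int)
        (pvTailStep (M : Int) (K : Int) (pvTailStep (M : Int) (K : Int)
          (pvTailStep (M : Int) (K : Int) dpMain))))) (pvIo 0 K M) hX0).1
    have hchain : pvGetX
        (pvTailStep (M : Int) (K : Int) (pvTailStep (M : Int) (K : Int)
          (pvTailStep (M : Int) (K : Int) (pvTailStep (M : Int) (K : Int)
            (pvTailStep (M : Int) (K : Int) (pvTailStep (M : Int) (K : Int) dpMain))))))
        (pvIo 0 K M) ≡ pvGsum M K 6 dpMain [ZMOD pvMod] := by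
      rw [hstart]
      refine (pvGstep M K _ (pvTail_wf M K _) 0).trans ?_
      refine (pvGstep M K _ (pvTail_wf M K _) 1).trans ?_
      refine (pvGstep M K _ (pvTail_wf M K _) 2).trans ?_
      refine (pvGstep M K _ (pvTail_wf M K _) 3).trans ?_
      refine (pvGstep M K _ (pvTail_wf M K _) 4).trans ?_
      exact pvGstep M K dpMain hAg.1 5
    exact hred.symm.trans hchain
  rw [hF]

-- ===== VERDICT (by name: the statement is the Claim_ definition above) =====
theorem magicalSum_spec : Claim_equal_magicalSum := by
  intro m k nums _ hPre
  unfold Spec_magicalSum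
  obtain ⟨hm, hk, h64⟩ := hPre
  lift m to ℕ using hm with M
  lift k to ℕ using hk with K
  exact magicalSum_eq_alt M K (by exact_mod_cast h64) nums
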